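-- pv_equiv track=rewrite | github.com/444thLiao/evol_tk | for_software/for_reconciliation/ale2xml.py | separateLeafNameFromLeafAnnotation
-- ===== SOURCE A (Python) =====
-- def separateLeafNameFromLeafAnnotation(leafName, sepSp="_", sepAnnot=(".", "@")):
--     """
--     Takes:
--         - leafName (str) : name of a leaf, potentially containing reconciliation information (exemple: "g_g3.T@4|3@1|g" )
--         - sepSp (str) [default = "_" ] : separator between species name and gene name
--         - sepAnnot (tuple) [default = (".","@") ] : possible separators between gene name and annotations
--
--     Returns:
--         (tuple)
--             (str) : gene name
--             (str) : reconciliation annotation  (empty string if there is none)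
--
--     """
--     spName, j, gNameAndAnnot = leafName.partition(sepSp)
--
--     x = 0
--     AnnotFound = False
--
--     while (not AnnotFound) and (x < len(gNameAndAnnot)):
--
--         if gNameAndAnnot[x] in sepAnnot:
--             AnnotFound = True
--             break
--         x += 1
--     # print "->", leafName[:x] , leafName[x:]
--     return spName + sepSp + gNameAndAnnot[:x], gNameAndAnnot[x:]
-- ===== SOURCE B (Python) =====
-- def separateLeafNameFromLeafAnnotation(leafName, sepSp="_", sepAnnot=(".", "@")):
--     spName, _, rest = leafName.partition(sepSp)
--     hits = [p for p in (rest.find(c) for c in sepAnnot if len(c) == 1) if p != -1]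
--     x = min(hits) if hits else len(rest)
--     return spName + sepSp + rest[:x], rest[x:]
-- ===== Notes on version B (the rewrite author's own statement) =====
-- stated objective: alternative
-- what changed: Replaces the character-by-character while loop over the suffix with one str.find per single-character separator plus a min over the hit positions.
import Mathlib
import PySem

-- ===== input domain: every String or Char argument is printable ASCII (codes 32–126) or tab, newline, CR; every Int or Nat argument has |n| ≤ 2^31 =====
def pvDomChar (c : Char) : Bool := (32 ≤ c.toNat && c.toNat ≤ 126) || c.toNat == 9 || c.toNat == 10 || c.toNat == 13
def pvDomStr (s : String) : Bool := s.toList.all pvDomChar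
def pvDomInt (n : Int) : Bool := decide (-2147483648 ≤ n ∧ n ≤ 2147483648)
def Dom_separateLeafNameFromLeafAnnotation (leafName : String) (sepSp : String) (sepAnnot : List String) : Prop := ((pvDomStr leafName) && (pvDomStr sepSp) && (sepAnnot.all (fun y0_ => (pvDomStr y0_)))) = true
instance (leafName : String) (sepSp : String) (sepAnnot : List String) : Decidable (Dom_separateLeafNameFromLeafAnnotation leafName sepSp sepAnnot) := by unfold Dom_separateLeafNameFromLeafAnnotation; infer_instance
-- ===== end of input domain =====

-- B replaces A's character-by-character scan of the suffix with one str.find per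
-- single-character separator and a min over the hit positions (alternative decomposition, same cost).


-- ===== PORT A =====
-- s.partition(sep), exact for a non-empty sep (Pre_ excludes the empty separator, where Python raises ValueError):
-- first occurrence of sep splits s; if absent, (s, "", "").  Shared: both Pythons call str.partition.
def pyPartition (s sep : List Char) : List Char × List Char × List Char :=
  let i := PySem.Chars.find s sep
  if i = -1 then (s, [], [])
  else (s.take i.toNat, sep, s.drop (i.toNat + sep.length))

-- A's while loop: x counts up until gNameAndAnnot[x] is an element of sepAnnot (a length-1 string equal to it)
def sepScanA (sepAnnot : List String) : List Char → Nat
  | [] => 0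
  | c :: cs => if sepAnnot.contains (String.ofList [c]) then 0 else sepScanA sepAnnot cs + 1

def separateLeafNameFromLeafAnnotation (leafName : String) (sepSp : String) (sepAnnot : List String) : String × String :=
  let p := pyPartition leafName.toList sepSp.toList
  let gNameAndAnnot := p.2.2
  let x := sepScanA sepAnnot gNameAndAnnot
  (String.ofList (p.1 ++ sepSp.toList ++ gNameAndAnnot.take x), String.ofList (gNameAndAnnot.drop x))

-- ===== PORT B =====
-- hits = [p for p in (rest.find(c) for c in sepAnnot if len(c) == 1) if p != -1]
def altHits (sepAnnot : List String) (rest : List Char) : List Int :=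
  (sepAnnot.filter (fun c => PySem.Str.len c == 1)).filterMap (fun c =>
    let p := PySem.Chars.find rest c.toList
    if p = -1 then none else some p)

def separateLeafNameFromLeafAnnotation_alt (leafName : String) (sepSp : String) (sepAnnot : List String) : String × String :=
  let p := pyPartition leafName.toList sepSp.toList
  let rest := p.2.2
  let x : Int := match PySem.List.min? (altHits sepAnnot rest) (fun v => v) with
    | some m => m
    | none => (rest.length : Int)
  (String.ofList (p.1 ++ sepSp.toList ++ PySem.List.slice rest none (some x)),
   String.ofList (PySem.List.slice rest (some x) none))

-- ===== PRECONDITION & SPEC =====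
-- Pre_ excludes only an empty sepSp, where Python's str.partition raises ValueError (in A and in B alike).
def Pre_separateLeafNameFromLeafAnnotation (leafName : String) (sepSp : String) (sepAnnot : List String) : Prop := sepSp ≠ ""
instance (leafName : String) (sepSp : String) (sepAnnot : List String) : Decidable (Pre_separateLeafNameFromLeafAnnotation leafName sepSp sepAnnot) := by unfold Pre_separateLeafNameFromLeafAnnotation; infer_instance
def pvWitness_separateLeafNameFromLeafAnnotation : String × String × List String := ("g_g3.T@4|3@1|g", "_", [".", "@"])

def Spec_separateLeafNameFromLeafAnnotation (leafName : String) (sepSp : String) (sepAnnot : List String) (out : String × String) : Prop := out = separateLeafNameFromLeafAnnotation_alt leafName sepSp sepAnnot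
instance (leafName : String) (sepSp : String) (sepAnnot : List String) (out : String × String) : Decidable (Spec_separateLeafNameFromLeafAnnotation leafName sepSp sepAnnot out) := by unfold Spec_separateLeafNameFromLeafAnnotation; infer_instance

-- ===== CLAIM (what is proved, stated in full; the proofs are below) =====
def Claim_equal_separateLeafNameFromLeafAnnotation : Prop := ∀ (leafName : String) (sepSp : String) (sepAnnot : List String), Dom_separateLeafNameFromLeafAnnotation leafName sepSp sepAnnot → Pre_separateLeafNameFromLeafAnnotation leafName sepSp sepAnnot → Spec_separateLeafNameFromLeafAnnotation leafName sepSp sepAnnot (separateLeafNameFromLeafAnnotation leafName sepSp sepAnnot)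

-- ===== LEMMAS AND PROOFS =====

theorem singleton_prefix_iff_getElem (l : List Char) (c : Char) : [c] <+: l ↔ l[0]? = some c := by
  cases l with
  | nil => simp
  | cons a t => simp [List.cons_prefix_cons, eq_comm]

theorem singleton_prefix_drop_iff (l : List Char) (c : Char) (j : Nat) :
    [c] <+: l.drop j ↔ l[j]? = some c := by
  rw [singleton_prefix_iff_getElem]
  simp [List.getElem?_drop]

theorem findIdx_le_of_pred (l : List Char) (p : Char → Bool) (j : Nat) (h : j < l.length)
    (hp : p l[j]) : l.findIdx p ≤ j := by
  by_contra hlt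
  exact absurd hp (by simpa using List.not_of_lt_findIdx (by omega))

def sepPred (sepAnnot : List String) (c : Char) : Bool := sepAnnot.contains (String.ofList [c])

theorem sepScanA_eq_findIdx (S : List String) (cs : List Char) :
    sepScanA S cs = cs.findIdx (sepPred S) := by
  induction cs with
  | nil => simp [sepScanA]
  | cons c t ih => simp [sepScanA, List.findIdx_cons, sepPred, ih]

-- every hit points at (the first occurrence of) a character of rest satisfying sepPred
theorem mem_altHits (S : List String) (rest : List Char) (q : Int) (hq : q ∈ altHits S rest) :
    0 ≤ q ∧ ∃ ch : Char, rest[q.toNat]? = some ch ∧ sepPred S ch = true := by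
  unfold altHits at hq
  obtain ⟨c, hc, hq⟩ := List.mem_filterMap.mp hq
  obtain ⟨hcS, hc1⟩ := List.mem_filter.mp hc
  simp only at hq
  split at hq
  · exact absurd hq (by simp)
  · rename_i hne
    obtain rfl : PySem.Chars.find rest c.toList = q := Option.some_inj.mp hq
    have h0 : 0 ≤ PySem.Chars.find rest c.toList := by
      have := PySem.Chars.neg_one_le_find rest c.toList
      omega
    obtain ⟨hpre, _⟩ := PySem.Chars.find_spec h0
    obtain ⟨ch, hch⟩ := List.length_eq_one_iff.mp (by
      simp only [PySem.Str.len_eq, String.length_toList, beq_iff_eq, Nat.cast_eq_one] at hc1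
      rw [String.length_toList]; exact hc1)
    refine ⟨h0, ch, ?_, ?_⟩
    · rw [← singleton_prefix_drop_iff, ← hch]; exact hpre
    · unfold sepPred
      rw [← hch, String.ofList_toList]
      exact List.contains_iff_mem.mpr hcS
  
theorem int_le_of_mem_altHits (S : List String) (rest : List Char) (q : Int)
    (hq : q ∈ altHits S rest) : (rest.findIdx (sepPred S) : Int) ≤ q := by
  obtain ⟨h0, ch, hget, hpred⟩ := mem_altHits S rest q hq
  have hlt : q.toNat < rest.length := (List.getElem?_eq_some_iff.mp hget).1
  have hch : rest[q.toNat] = ch := (List.getElem?_eq_some_iff.mp hget).2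
  have := findIdx_le_of_pred rest (sepPred S) q.toNat hlt (by rw [hch]; exact hpred)
  omega

theorem key_min_eq_scan (S : List String) (rest : List Char) :
    (match PySem.List.min? (altHits S rest) (fun v => v) with
      | some m => m
      | none => (rest.length : Int)) = ((sepScanA S rest : Nat) : Int) := by
  rw [sepScanA_eq_findIdx]
  by_cases h : rest.findIdx (sepPred S) < rest.length
  · -- a separator occurs: its find position is a hit equal to findIdx, and every hit is ≥ findIdx
    have hpred : sepPred S rest[rest.findIdx (sepPred S)] = true := List.findIdx_getElem
    set ch := rest[rest.findIdx (sepPred S)] with hchdef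
    have hctl : (String.ofList [ch]).toList = [ch] := String.toList_ofList (l := [ch])
    have hpre : [ch] <+: rest.drop (rest.findIdx (sepPred S)) :=
      (singleton_prefix_drop_iff rest ch _).mpr (List.getElem?_eq_getElem h)
    have hne : PySem.Chars.find rest [ch] ≠ -1 :=
      (PySem.Chars.find_ne_neg_one_iff _ _).mpr
        ((PySem.Chars.isIn_iff_infix _ _).mp ((PySem.Chars.exists_prefix_drop_iff_isIn _ _).mp ⟨_, hpre⟩))
    have h0 : 0 ≤ PySem.Chars.find rest [ch] := by
      have := PySem.Chars.neg_one_le_find rest [ch]; omega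
    have hmem : PySem.Chars.find rest [ch] ∈ altHits S rest := by
      unfold altHits
      refine List.mem_filterMap.mpr ⟨String.ofList [ch], List.mem_filter.mpr ⟨?_, ?_⟩, ?_⟩
      · exact List.contains_iff_mem.mp hpred
      · simp [PySem.Str.len_eq]
      · simp only [hctl]
        exact if_neg hne ▸ rfl
    have hle : (PySem.Chars.find rest [ch]).toNat ≤ rest.findIdx (sepPred S) := by
      by_contra hgt
      exact absurd hpre ((PySem.Chars.find_spec h0).2 _ (by omega))
    have hge := int_le_of_mem_altHits S rest _ hmem
    have hne' : PySem.List.min? (altHits S rest) (fun v : Int => v) ≠ none := fun hnone =>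
      List.ne_nil_of_mem hmem ((PySem.List.min?_eq_none_iff _ _).mp hnone)
    obtain ⟨m, hmin⟩ := Option.ne_none_iff_exists'.mp hne'
    rw [hmin]
    change m = ((rest.findIdx (sepPred S) : Nat) : Int)
    have hm1 := int_le_of_mem_altHits S rest m (PySem.List.min?_mem hmin)
    have hm2 := PySem.List.min?_isMin hmin _ hmem
    simp only at hm2
    omega
  · -- no separator occurs in rest: there are no hits, and findIdx = length
    have hnil : altHits S rest = [] := by
      refine List.eq_nil_iff_forall_not_mem.mpr fun q hq => ?_
      obtain ⟨h0, ch, hget, hpred⟩ := mem_altHits S rest q hq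
      have hlt : q.toNat < rest.length := (List.getElem?_eq_some_iff.mp hget).1
      have hch : rest[q.toNat] = ch := (List.getElem?_eq_some_iff.mp hget).2
      have := findIdx_le_of_pred rest (sepPred S) q.toNat hlt (by rw [hch]; exact hpred)
      omega
    have hlen := List.findIdx_le_length (p := sepPred S) (xs := rest)
    rw [hnil]
    change ((rest.length : Int)) = ((rest.findIdx (sepPred S) : Nat) : Int)
    omega

theorem separateLeafNameFromLeafAnnotation_spec : Claim_equal_separateLeafNameFromLeafAnnotation := by
  intro leafName sepSp sepAnnot _ _
  unfold Spec_separateLeafNameFromLeafAnnotation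
  unfold separateLeafNameFromLeafAnnotation separateLeafNameFromLeafAnnotation_alt
  simp only
  rw [key_min_eq_scan]
  rw [PySem.List.slice_to_natCast, PySem.List.slice_from_natCast]
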